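-- pv_equiv track=rewrite | github.com/ShalakaSonawane1/vendorscope | backend/app/services/agent.py | _parse_agent_response
-- ===== SOURCE A (Python) =====
-- from typing import List, Dict
--
-- def _parse_agent_response(response_text: str) -> Dict:
--     """Parse LLM response into structured data"""
--
--     # Simple parsing - in production, use structured output
--     lines = response_text.strip().split('\n')
--
--     confidence = "medium"
--     risk = None
--
--     # Extract confidence level
--     for line in lines:
--         lower_line = line.lower()
--         if 'confidence' in lower_line:
--             if 'high' in lower_line:
--                 confidence = "high"
--             elif 'low' in lower_line:
--                 confidence = "low"
--
--         if 'risk' in lower_line: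
--             if 'low risk' in lower_line:
--                 risk = "low"
--             elif 'medium risk' in lower_line or 'moderate risk' in lower_line:
--                 risk = "medium"
--             elif 'high risk' in lower_line:
--                 risk = "high"
--
--     return {
--         "answer": response_text,
--         "confidence_level": confidence,
--         "risk_assessment": risk
--     }
-- ===== SOURCE B (Python) =====
-- def _parse_agent_response(response_text: str):
--     # Reverse scans: last-match-wins becomes first definitive hit from the end.
--     lines = response_text.strip().split('\n')
--
--     confidence = "medium"
--     for line in reversed(lines):
--         lower_line = line.lower()
--         if 'confidence' in lower_line:
--             if 'high' in lower_line:
--                 confidence = "high"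
--                 break
--             if 'low' in lower_line:
--                 confidence = "low"
--                 break
--
--     risk = None
--     for line in reversed(lines):
--         lower_line = line.lower()
--         if 'low risk' in lower_line:
--             risk = "low"
--             break
--         if 'medium risk' in lower_line or 'moderate risk' in lower_line:
--             risk = "medium"
--             break
--         if 'high risk' in lower_line:
--             risk = "high"
--             break
--
--     return {
--         "answer": response_text,
--         "confidence_level": confidence,
--         "risk_assessment": risk,
--     }
-- ===== Notes on version B (the rewrite author's own statement) =====
-- stated objective: alternative
-- what changed: A's single forward loop with last-match-wins overwriting of two state variables is replaced by two independent reversed scans that each stop at the first definitive line (early exit), with no mutable state.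
import Mathlib
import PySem

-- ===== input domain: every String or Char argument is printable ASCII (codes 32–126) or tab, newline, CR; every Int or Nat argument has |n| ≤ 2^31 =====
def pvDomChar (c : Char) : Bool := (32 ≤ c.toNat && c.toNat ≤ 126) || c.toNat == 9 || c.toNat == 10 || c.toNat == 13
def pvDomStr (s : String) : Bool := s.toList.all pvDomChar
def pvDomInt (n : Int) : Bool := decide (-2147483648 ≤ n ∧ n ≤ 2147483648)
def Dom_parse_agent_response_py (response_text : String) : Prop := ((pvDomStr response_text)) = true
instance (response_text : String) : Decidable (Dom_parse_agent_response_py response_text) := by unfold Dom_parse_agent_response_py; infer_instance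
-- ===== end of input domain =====

-- B replaces A's single forward last-match-wins loop by two independent reversed scans that
-- stop at the first definitive line (objective: alternative decomposition, same cost).

-- ===== PORT A =====
def parse_agent_response_py (response_text : String) : List (String × Option String) :=
  let lines := (PySem.Str.split? (PySem.Str.strip response_text) "\n").getD []
  let st := lines.foldl (fun (st : String × Option String) line =>
    let lower_line := PySem.Str.lower line
    let confidence :=
      if PySem.Str.isIn "confidence" lower_line then
        if PySem.Str.isIn "high" lower_line then "high"
        else if PySem.Str.isIn "low" lower_line then "low"
        else st.1
      else st.1
    let risk :=
      if PySem.Str.isIn "risk" lower_line then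
        if PySem.Str.isIn "low risk" lower_line then some "low"
        else if PySem.Str.isIn "medium risk" lower_line || PySem.Str.isIn "moderate risk" lower_line then some "medium"
        else if PySem.Str.isIn "high risk" lower_line then some "high"
        else st.2
      else st.2
    (confidence, risk)) ("medium", none)
  [("answer", some response_text), ("confidence_level", some st.1), ("risk_assessment", st.2)]

-- ===== PORT B =====
-- reversed-scan loop for confidence: first definitive line wins, else default "medium"
def pvConfScan : List String → String
  | [] => "medium"
  | line :: rest =>
    let lower_line := PySem.Str.lower line
    if PySem.Str.isIn "confidence" lower_line then
      if PySem.Str.isIn "high" lower_line then "high"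
      else if PySem.Str.isIn "low" lower_line then "low"
      else pvConfScan rest
    else pvConfScan rest

-- reversed-scan loop for risk: first definitive line wins, else default none
def pvRiskScan : List String → Option String
  | [] => none
  | line :: rest =>
    let lower_line := PySem.Str.lower line
    if PySem.Str.isIn "low risk" lower_line then some "low"
    else if PySem.Str.isIn "medium risk" lower_line || PySem.Str.isIn "moderate risk" lower_line then some "medium"
    else if PySem.Str.isIn "high risk" lower_line then some "high"
    else pvRiskScan rest

def parse_agent_response_py_alt (response_text : String) : List (String × Option String) :=
  let lines := (PySem.Str.split? (PySem.Str.strip response_text) "\n").getD []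
  [("answer", some response_text),
   ("confidence_level", some (pvConfScan lines.reverse)),
   ("risk_assessment", pvRiskScan lines.reverse)]

-- ===== PRECONDITION & SPEC =====
def Spec_parse_agent_response_py (response_text : String) (out : List (String × Option String)) : Prop := out = parse_agent_response_py_alt response_text
instance (response_text : String) (out : List (String × Option String)) : Decidable (Spec_parse_agent_response_py response_text out) := by unfold Spec_parse_agent_response_py; infer_instance

-- ===== CLAIM (what is proved, stated in full; the proofs are below) =====
def Claim_equal_parse_agent_response_py : Prop := ∀ (response_text : String), Dom_parse_agent_response_py response_text → Spec_parse_agent_response_py response_text (parse_agent_response_py response_text)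

-- ===== LEMMAS AND PROOFS =====

-- the definitive-line predicates and the value a definitive line sets
def pvPConf (l : String) : Bool :=
  PySem.Str.isIn "confidence" (PySem.Str.lower l) &&
    (PySem.Str.isIn "high" (PySem.Str.lower l) || PySem.Str.isIn "low" (PySem.Str.lower l))
def pvFConf (l : String) : String :=
  if PySem.Str.isIn "high" (PySem.Str.lower l) then "high" else "low"
def pvPRisk (l : String) : Bool :=
  PySem.Str.isIn "low risk" (PySem.Str.lower l) || PySem.Str.isIn "medium risk" (PySem.Str.lower l) ||
    PySem.Str.isIn "moderate risk" (PySem.Str.lower l) || PySem.Str.isIn "high risk" (PySem.Str.lower l)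
def pvFRisk (l : String) : Option String :=
  if PySem.Str.isIn "low risk" (PySem.Str.lower l) then some "low"
  else if PySem.Str.isIn "medium risk" (PySem.Str.lower l) || PySem.Str.isIn "moderate risk" (PySem.Str.lower l) then some "medium"
  else some "high"

-- any of the four risk patterns is an infix containing "risk"
lemma pv_isIn_risk_of_pat (pat s : String) (hp : "risk".toList <:+: pat.toList)
    (h : PySem.Str.isIn pat s = true) : PySem.Str.isIn "risk" s = true := by
  rw [PySem.Str.isIn_iff_infix] at h ⊢
  exact hp.trans h

-- generic Bool shape of A's confidence branch: update only on a definitive line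
lemma pv_conf_shape (a b c' : Bool) (cdef : String) :
    (if a then (if b then "high" else if c' then "low" else cdef) else cdef)
      = if a && (b || c') then (if b then "high" else "low") else cdef := by
  cases a <;> cases b <;> cases c' <;> simp

-- generic Bool shape of A's risk branch (g = 'risk' in line, implied by each pattern)
lemma pv_risk_shape (g p1 p2 p3 p4 : Bool) (r : Option String)
    (i1 : p1 = true → g = true) (i2 : p2 = true → g = true)
    (i3 : p3 = true → g = true) (i4 : p4 = true → g = true) :
    (if g then (if p1 then some "low" else if p2 || p3 then some "medium"
                 else if p4 then some "high" else r) else r)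
      = if p1 || p2 || p3 || p4 then
          (if p1 then some "low" else if p2 || p3 then some "medium" else some "high")
        else r := by
  cases g <;> cases p1 <;> cases p2 <;> cases p3 <;> cases p4 <;> simp_all

-- A's loop step, seen abstractly on each component
lemma pv_stepA_conf (c : String) (line : String) :
    (if PySem.Str.isIn "confidence" (PySem.Str.lower line) then
        if PySem.Str.isIn "high" (PySem.Str.lower line) then "high"
        else if PySem.Str.isIn "low" (PySem.Str.lower line) then "low"
        else c
      else c) = if pvPConf line then pvFConf line else c := by
  simpa only [pvPConf, pvFConf] using
    pv_conf_shape (PySem.Str.isIn "confidence" (PySem.Str.lower line))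
      (PySem.Str.isIn "high" (PySem.Str.lower line))
      (PySem.Str.isIn "low" (PySem.Str.lower line)) c

lemma pv_stepA_risk (r : Option String) (line : String) :
    (if PySem.Str.isIn "risk" (PySem.Str.lower line) then
        if PySem.Str.isIn "low risk" (PySem.Str.lower line) then some "low"
        else if PySem.Str.isIn "medium risk" (PySem.Str.lower line) || PySem.Str.isIn "moderate risk" (PySem.Str.lower line) then some "medium"
        else if PySem.Str.isIn "high risk" (PySem.Str.lower line) then some "high"
        else r
      else r) = if pvPRisk line then pvFRisk line else r := by
  simpa only [pvPRisk, pvFRisk, Bool.or_assoc] using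
    pv_risk_shape (PySem.Str.isIn "risk" (PySem.Str.lower line))
      (PySem.Str.isIn "low risk" (PySem.Str.lower line))
      (PySem.Str.isIn "medium risk" (PySem.Str.lower line))
      (PySem.Str.isIn "moderate risk" (PySem.Str.lower line))
      (PySem.Str.isIn "high risk" (PySem.Str.lower line)) r
      (pv_isIn_risk_of_pat _ _ (by decide)) (pv_isIn_risk_of_pat _ _ (by decide))
      (pv_isIn_risk_of_pat _ _ (by decide)) (pv_isIn_risk_of_pat _ _ (by decide))

-- A's fold computes, on each component, the value set by the last definitive line (if any)
lemma pv_foldA_eq_find (ls : List String) : ∀ (c : String) (r : Option String),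
    ls.foldl (fun (st : String × Option String) line =>
      let lower_line := PySem.Str.lower line
      let confidence :=
        if PySem.Str.isIn "confidence" lower_line then
          if PySem.Str.isIn "high" lower_line then "high"
          else if PySem.Str.isIn "low" lower_line then "low"
          else st.1
        else st.1
      let risk :=
        if PySem.Str.isIn "risk" lower_line then
          if PySem.Str.isIn "low risk" lower_line then some "low"
          else if PySem.Str.isIn "medium risk" lower_line || PySem.Str.isIn "moderate risk" lower_line then some "medium"
          else if PySem.Str.isIn "high risk" lower_line then some "high"
          else st.2
        else st.2
      (confidence, risk)) (c, r)
    = (((ls.reverse.find? pvPConf).map pvFConf).getD c,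
       ((ls.reverse.find? pvPRisk).map pvFRisk).getD r) := by
  induction ls with
  | nil => intro c r; simp
  | cons x t ih =>
    intro c r
    simp only [List.foldl_cons, List.reverse_cons, List.find?_append]
    rw [pv_stepA_conf c x, pv_stepA_risk r x]
    rw [ih]
    cases hc : t.reverse.find? pvPConf <;> cases hr : t.reverse.find? pvPRisk <;>
      cases hpc : pvPConf x <;> cases hpr : pvPRisk x <;>
        simp [List.find?, hpc, hpr, Option.or]

-- B's reversed scans compute the first definitive line's value
lemma pv_confScan_eq_find (xs : List String) :
    pvConfScan xs = ((xs.find? pvPConf).map pvFConf).getD "medium" := by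
  induction xs with
  | nil => simp [pvConfScan]
  | cons x t ih =>
    cases h1 : PySem.Str.isIn "confidence" (PySem.Str.lower x) <;>
      cases h2 : PySem.Str.isIn "high" (PySem.Str.lower x) <;>
        cases h3 : PySem.Str.isIn "low" (PySem.Str.lower x) <;>
          simp only [pvConfScan, List.find?, pvPConf, h1, h2, h3,
            Bool.false_and, Bool.true_and, Bool.or_true, ih] <;>
          simp_all [pvFConf]

lemma pv_riskScan_eq_find (xs : List String) :
    pvRiskScan xs = ((xs.find? pvPRisk).map pvFRisk).getD none := by
  induction xs with
  | nil => simp [pvRiskScan]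
  | cons x t ih =>
    cases h1 : PySem.Str.isIn "low risk" (PySem.Str.lower x) <;>
      cases h2 : PySem.Str.isIn "medium risk" (PySem.Str.lower x) <;>
        cases h3 : PySem.Str.isIn "moderate risk" (PySem.Str.lower x) <;>
          cases h4 : PySem.Str.isIn "high risk" (PySem.Str.lower x) <;>
            simp only [pvRiskScan, List.find?, pvPRisk, h1, h2, h3, h4,
              Bool.false_or, Bool.true_or, Bool.or_true, ih] <;>
            simp_all [pvFRisk]

-- ===== VERDICT (by name: the statement is the Claim_ definition above) =====
theorem parse_agent_response_py_spec : Claim_equal_parse_agent_response_py := by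
  intro response_text _
  unfold Spec_parse_agent_response_py parse_agent_response_py parse_agent_response_py_alt
  dsimp only []
  rw [pv_foldA_eq_find, pv_confScan_eq_find, pv_riskScan_eq_find]
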